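-- pv_equiv track=rewrite | github.com/daniel-reich/ubiquitous-fiesta | 6vSZmN66xhMRDX8YT_12.py | advanced_sort
-- ===== SOURCE A (Python) =====
-- def advanced_sort(lst):
--     final_list=[]
--     for val in lst:
--         count=lst.count(val)
--         new_list=[val for i in range(count)]
--         if new_list not in final_list:
--             final_list.append(new_list)
--     return final_list
-- ===== SOURCE B (Python) =====
-- def advanced_sort(lst):
--     groups = {}
--     for val in lst:
--         groups.setdefault(val, []).append(val)
--     return list(groups.values())
-- ===== Notes on version B (the rewrite author's own statement) =====
-- stated objective: faster
-- what changed: Replaced the per-element lst.count scan and list-membership test with a single pass that appends each occurrence into an insertion-ordered dict bucket keyed by its value, returning the bucket lists.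
import Mathlib
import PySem

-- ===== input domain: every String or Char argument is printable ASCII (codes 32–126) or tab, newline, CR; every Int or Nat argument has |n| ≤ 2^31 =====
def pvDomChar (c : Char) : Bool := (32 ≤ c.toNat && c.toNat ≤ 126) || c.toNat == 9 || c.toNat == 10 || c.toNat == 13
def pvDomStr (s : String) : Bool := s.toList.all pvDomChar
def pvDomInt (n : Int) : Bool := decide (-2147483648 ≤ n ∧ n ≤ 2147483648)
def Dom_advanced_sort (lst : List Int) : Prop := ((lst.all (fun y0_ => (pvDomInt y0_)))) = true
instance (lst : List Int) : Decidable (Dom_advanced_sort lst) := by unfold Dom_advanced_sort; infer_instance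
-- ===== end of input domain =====

-- B groups each occurrence into an insertion-ordered dict bucket keyed by its value (one pass),
-- instead of A's per-element lst.count scan and membership test; a timing run measures the speed label.
-- ===== PORT A =====
def advanced_sort (lst : List Int) : List (List Int) :=
  lst.foldl (fun final_list val =>
    let count : Int := PySem.List.count lst val
    let new_list : List Int := (PySem.List.pyRange 0 count 1).map (fun _ => val)
    if new_list ∈ final_list then final_list else final_list ++ [new_list]) []

-- ===== PORT B =====
def advanced_sort_alt (lst : List Int) : List (List Int) :=
  (lst.foldl (fun groups val => groups.modify val [] (· ++ [val])) (PySem.Dict.empty : PySem.Dict Int (List Int))).values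

-- ===== PRECONDITION & SPEC =====
def Spec_advanced_sort (lst : List Int) (out : List (List Int)) : Prop := out = advanced_sort_alt lst
instance (lst : List Int) (out : List (List Int)) : Decidable (Spec_advanced_sort lst out) := by unfold Spec_advanced_sort; infer_instance

-- ===== CLAIM (what is proved, stated in full; the proofs are below) =====
def Claim_equal_advanced_sort : Prop := ∀ (lst : List Int), Dom_advanced_sort lst → Spec_advanced_sort lst (advanced_sort lst)

-- ===== LEMMAS AND PROOFS =====

-- ===== VERDICT (by name: the statement is the Claim_ definition above) =====
-- repl lst c: the sublist A emits for value c
def repl (lst : List Int) (c : Int) : List Int := List.replicate (lst.count c) c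

theorem pyRange_map_const (n : Int) (v : Int) :
    (PySem.List.pyRange 0 n 1).map (fun _ => v) = List.replicate n.toNat v := by
  rw [PySem.List.pyRange_one, List.map_map]
  refine List.eq_replicate_iff.mpr ⟨by simp, by simp⟩

theorem repl_eq_newlist (lst : List Int) (v : Int) :
    (PySem.List.pyRange 0 (PySem.List.count lst v) 1).map (fun _ => v) = repl lst v := by
  rw [pyRange_map_const]
  simp [repl, PySem.List.count_eq]

theorem repl_mem_map (lst : List Int) (S : List Int) (v : Int) (hv : v ∈ lst)
    (_hS : ∀ c ∈ S, c ∈ lst) : repl lst v ∈ S.map (repl lst) ↔ v ∈ S := by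
  constructor
  · intro h
    obtain ⟨c, hc, hrep⟩ := List.mem_map.mp h
    have hvv : v ∈ repl lst v := by
      unfold repl
      exact List.mem_replicate.mpr ⟨(List.count_pos_iff.mpr hv).ne', rfl⟩
    rw [← hrep] at hvv
    unfold repl at hvv
    rw [List.eq_of_mem_replicate hvv]
    exact hc
  · exact fun h => List.mem_map_of_mem h

theorem A_loop (lst l S : List Int) (hl : ∀ x ∈ l, x ∈ lst) (hS : ∀ c ∈ S, c ∈ lst) :
    l.foldl (fun final_list val =>
      if repl lst val ∈ final_list then final_list else final_list ++ [repl lst val])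
      (S.map (repl lst))
    = (PySem.Set.update S l).map (repl lst) := by
  induction l generalizing S with
  | nil => simp [PySem.Set.update]
  | cons v l ih =>
    have hv : v ∈ lst := hl v (by simp)
    rw [PySem.Set.update_cons, List.foldl_cons]
    by_cases hmem : v ∈ S
    · rw [if_pos ((repl_mem_map lst S v hv hS).mpr hmem), PySem.Set.add_of_mem hmem]
      exact ih S (fun x hx => hl x (by simp [hx])) hS
    · rw [if_neg (fun h => hmem ((repl_mem_map lst S v hv hS).mp h)),
        PySem.Set.add_of_not_mem hmem,
        show List.map (repl lst) S ++ [repl lst v] = List.map (repl lst) (S ++ [v]) by simp]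
      exact ih (S ++ [v]) (fun x hx => hl x (by simp [hx]))
        (fun c hc => by rcases List.mem_append.mp hc with h | h
                        · exact hS c h
                        · simp at h; subst h; exact hv)

theorem B_eq (lst : List Int) :
    advanced_sort_alt lst = (PySem.Set.ofList lst).map (repl lst) := by
  unfold advanced_sort_alt
  set d := lst.foldl (fun groups val => groups.modify val [] (· ++ [val]))
    (PySem.Dict.empty : PySem.Dict Int (List Int)) with hd
  have hnd : d.keys.Nodup := by
    rw [hd]
    exact PySem.Dict.nodup_keys_foldl_modify_key lst id [] (fun _ v => (· ++ [v])) _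
      (by simp)
  have hkeys : d.keys = PySem.Set.ofList lst := by
    rw [hd, PySem.Dict.keys_foldl_modify]
    simp [PySem.Dict.keys_empty, PySem.Set.update_nil_left]
  have hget : ∀ c, d.getD c [] = repl lst c := by
    intro c
    have hfold : d = (lst.map (fun v => (v, v))).foldl
        (fun d p => d.modify p.1 [] (· ++ [p.2])) (PySem.Dict.empty : PySem.Dict Int (List Int)) := by
      rw [hd, List.foldl_map]
    rw [hfold, PySem.Dict.getD_foldl_modify_append]
    rw [List.filter_map]
    simp only [List.map_map, PySem.Dict.getD_empty, List.nil_append]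
    have h1 : (List.filter ((fun p => p.1 == c) ∘ fun v => (v, v)) lst) = lst.filter (· == c) := by
      rfl
    rw [h1, List.filter_beq (l := lst) c]
    simp [repl]
  rw [PySem.Dict.values_eq_map_keys d hnd [], hkeys]
  exact List.map_congr_left (fun c _ => hget c)

theorem advanced_sort_spec : Claim_equal_advanced_sort := by
  intro lst _
  unfold Spec_advanced_sort
  rw [B_eq]
  have := A_loop lst lst [] (fun x h => h) (by simp)
  simpa [advanced_sort, repl_eq_newlist, PySem.Set.update_nil_left,
    PySem.Set.ofList_eq_foldl] using this
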